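-- pv_equiv track=rewrite | github.com/samucj73/roleta-analise | dashboard_roleta.py | prever_proximo_markov
-- ===== SOURCE A (Python) =====
-- from collections import Counter
--
-- def prever_proximo_markov(numeros):
--     transicoes = {}
--     for i in range(len(numeros)-1):
--         atual = numeros[i]
--         prox = numeros[i+1]
--         if atual not in transicoes:
--             transicoes[atual] = []
--         transicoes[atual].append(prox)
--
--     if numeros:
--         ultimo = numeros[-1]
--         if ultimo in transicoes:
--             candidatos = Counter(transicoes[ultimo])
--             return candidatos.most_common(3)
--     return []
-- ===== SOURCE B (Python) =====
-- from collections import Counter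
--
-- def prever_proximo_markov(numeros):
--     if not numeros:
--         return []
--     ultimo = numeros[-1]
--     succ = [b for a, b in zip(numeros, numeros[1:]) if a == ultimo]
--     return Counter(succ).most_common(3)
-- ===== Notes on version B (the rewrite author's own statement) =====
-- stated objective: simpler
-- what changed: Instead of building a full dict of successor lists for every number and then looking up the last one, B filters the zip of consecutive pairs for the last number's successors in one comprehension and feeds only those to Counter.most_common(3).
import Mathlib
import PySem

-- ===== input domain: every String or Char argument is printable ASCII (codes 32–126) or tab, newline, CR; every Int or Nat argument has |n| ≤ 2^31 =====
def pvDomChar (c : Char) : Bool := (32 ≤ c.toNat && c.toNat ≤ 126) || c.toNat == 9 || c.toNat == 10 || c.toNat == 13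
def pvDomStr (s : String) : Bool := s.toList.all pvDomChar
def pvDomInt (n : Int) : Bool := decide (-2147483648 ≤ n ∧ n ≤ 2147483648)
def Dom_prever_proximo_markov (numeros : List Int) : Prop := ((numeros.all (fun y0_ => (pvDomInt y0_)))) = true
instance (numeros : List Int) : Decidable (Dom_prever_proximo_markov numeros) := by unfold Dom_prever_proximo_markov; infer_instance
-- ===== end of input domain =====

-- B replaces A's full transition dictionary by a single comprehension collecting only the
-- successors of the last number; objective: simpler (same O(n) time, less bookkeeping).

-- Counter(xs).most_common(3): items in first-occurrence order, stably sorted by count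
-- descending (CPython's heapq.nlargest == sorted(..., reverse=True)[:n]), first 3.
def pvMostCommon3 (xs : List Int) : List (Int × Int) :=
  (PySem.List.sorted (PySem.Dict.counter xs).items (fun p => p.2) true).take 3

-- ===== PORT A =====
def prever_proximo_markov (numeros : List Int) : List (Int × Int) :=
  let transicoes : PySem.Dict Int (List Int) :=
    (PySem.List.pyRange 0 ((numeros.length : Int) - 1) 1).foldl
      (fun d i =>
        let atual := PySem.List.pyGetD numeros i 0
        let prox := PySem.List.pyGetD numeros (i + 1) 0
        let d' := if d.contains atual then d else d.insert atual []
        d'.modify atual [] (fun l => l ++ [prox]))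
      PySem.Dict.empty
  if numeros.isEmpty then []
  else
    let ultimo := PySem.List.pyGetD numeros (-1) 0
    if transicoes.contains ultimo then
      pvMostCommon3 (transicoes.getD ultimo [])
    else []

-- ===== PORT B =====
def prever_proximo_markov_alt (numeros : List Int) : List (Int × Int) :=
  if numeros.isEmpty then []
  else
    let ultimo := PySem.List.pyGetD numeros (-1) 0
    let succ :=
      ((numeros.zip (PySem.List.slice numeros (some 1) none)).filter
        (fun p => p.1 == ultimo)).map (fun p => p.2)
    pvMostCommon3 succ

-- ===== PRECONDITION & SPEC =====
def Spec_prever_proximo_markov (numeros : List Int) (out : List (Int × Int)) : Prop := out = prever_proximo_markov_alt numeros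
instance (numeros : List Int) (out : List (Int × Int)) : Decidable (Spec_prever_proximo_markov numeros out) := by unfold Spec_prever_proximo_markov; infer_instance

-- ===== CLAIM (what is proved, stated in full; the proofs are below) =====
def Claim_equal_prever_proximo_markov : Prop := ∀ (numeros : List Int), Dom_prever_proximo_markov numeros → Spec_prever_proximo_markov numeros (prever_proximo_markov numeros)

-- ===== LEMMAS AND PROOFS =====

-- The index range of A's loop enumerates exactly the consecutive pairs zipped by B.
lemma pv_pairs_eq (xs : List Int) :
    (PySem.List.pyRange 0 ((xs.length : Int) - 1) 1).map
      (fun i => (PySem.List.pyGetD xs i 0, PySem.List.pyGetD xs (i + 1) 0))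
    = xs.zip xs.tail := by
  apply List.ext_getElem
  · simp [PySem.List.length_pyRange_one, List.length_zip, List.length_tail]
  · intro k h1 h2
    have hk : k + 1 < xs.length := by
      simp [PySem.List.length_pyRange_one] at h1; omega
    have hget : ∀ (m : Nat) (hm : m < xs.length),
        PySem.List.pyGetD xs (m : Int) 0 = xs[m]'hm := by
      intro m hm
      simp [List.getD_eq_getElem?_getD, List.getElem?_eq_getElem hm]
    simp only [List.getElem_map, PySem.List.getElem_pyRange_one, List.getElem_zip]
    rw [show (0 : Int) + (k : Int) = (k : Int) by ring,
        show ((k : Int)) + 1 = (((k + 1 : Nat)) : Int) by push_cast; ring,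
        hget k (by omega), hget (k+1) hk]
    simp [List.getElem_tail]

-- One step of A's loop body, seen through getD with default [].
lemma pv_step_getD (d : PySem.Dict Int (List Int)) (p : Int × Int) (c : Int) :
    ((if d.contains p.1 then d else d.insert p.1 []).modify p.1 [] (fun l => l ++ [p.2])).getD c []
    = d.getD c [] ++ (if p.1 = c then [p.2] else []) := by
  by_cases he : p.1 = c
  · subst he
    by_cases hc : d.contains p.1 <;>
      simp [hc, PySem.Dict.getD_modify_self, PySem.Dict.getD_insert_self,
        PySem.Dict.getD_of_not_contains]
  · by_cases hc : d.contains p.1 <;>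
      simp [hc, he, PySem.Dict.getD_modify, PySem.Dict.getD_insert, Ne.symm he]

lemma pv_foldl_getD (l : List (Int × Int)) (d : PySem.Dict Int (List Int)) (c : Int) :
    (l.foldl (fun d p =>
        (if d.contains p.1 then d else d.insert p.1 []).modify p.1 [] (fun l => l ++ [p.2])) d).getD c []
    = d.getD c [] ++ (l.filter (fun p => p.1 == c)).map (fun p => p.2) := by
  induction l generalizing d with
  | nil => simp
  | cons p t ih =>
    simp only [List.foldl_cons, ih, pv_step_getD]
    by_cases he : p.1 = c <;> simp [he]

lemma pv_foldl_contains (l : List (Int × Int)) (d : PySem.Dict Int (List Int)) (c : Int) :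
    (l.foldl (fun d p =>
        (if d.contains p.1 then d else d.insert p.1 []).modify p.1 [] (fun l => l ++ [p.2])) d).contains c
    = (d.contains c || l.any (fun p => p.1 == c)) := by
  induction l generalizing d with
  | nil => simp
  | cons p t ih =>
    simp only [List.foldl_cons, ih, List.any_cons]
    by_cases he : p.1 = c
    · subst he
      by_cases hc : d.contains p.1 <;>
        simp [hc, PySem.Dict.contains_modify]
    · have h1 : (c == p.1) = false := by simp [Ne.symm he]
      have h2 : (p.1 == c) = false := by simp [he]
      by_cases hc : d.contains p.1 <;>
        simp [hc, h1, h2, PySem.Dict.contains_modify, PySem.Dict.contains_insert]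

-- ===== VERDICT (by name: the statement is the Claim_ definition above) =====
theorem prever_proximo_markov_spec : Claim_equal_prever_proximo_markov := by
  intro numeros _
  unfold Spec_prever_proximo_markov prever_proximo_markov prever_proximo_markov_alt
  by_cases hnil : numeros.isEmpty
  · simp [hnil]
  · simp only [hnil]
    rw [PySem.List.slice_from_one]
    set ultimo := PySem.List.pyGetD numeros (-1) 0 with hu
    have hfold :
        (PySem.List.pyRange 0 ((numeros.length : Int) - 1) 1).foldl
          (fun d i =>
            let atual := PySem.List.pyGetD numeros i 0
            let prox := PySem.List.pyGetD numeros (i + 1) 0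
            let d' := if d.contains atual then d else d.insert atual []
            d'.modify atual [] (fun l => l ++ [prox]))
          PySem.Dict.empty
        = ((numeros.zip numeros.tail).foldl (fun d p =>
            (if d.contains p.1 then d else d.insert p.1 []).modify p.1 [] (fun l => l ++ [p.2]))
            PySem.Dict.empty) := by
      rw [← pv_pairs_eq numeros, List.foldl_map]
    rw [hfold]
    rw [pv_foldl_contains, pv_foldl_getD]
    by_cases hcon : (numeros.zip numeros.tail).any (fun p => p.1 == ultimo)
    · simp [hcon]
    · have hany : ((numeros.zip numeros.tail).any fun p => p.1 == ultimo) = false :=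
        eq_false_of_ne_true hcon
      have hfilter : List.filter (fun p => p.1 == ultimo) (numeros.zip numeros.tail) = [] := by
        rw [List.filter_eq_nil_iff]
        intro p hp
        simp [List.any_eq_false.mp hany p hp]
      simp only [hany, Bool.false_eq_true, if_false, hfilter, List.map_nil]
      simp [PySem.Dict.contains_empty]
      decide
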